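-- pv_equiv track=rewrite | github.com/omer1998/DSA-MOOC-FI | week5/reservations.py | check_overlapping
-- ===== SOURCE A (Python) =====
-- def check_overlapping(reservations):
--     """
--     You are given a list containing reservations as day ranges. Each range is a pair (a,b), where 1 \le a \le b: the reservation starts on the day a and ends on the day b.
-- Your task is to determine if the list contains two overlapping reservations, i.e., two ranges with one or more common days.
-- For example, the list [(4,7),(1,2)] means that the first reservation is from the day 4 to the day 7,
-- and the second reservation is from the day 1 to the day 2. These two reservations do not ovelap.
-- On the other hand, the reservations on the list [(4,7),(1,5)] do overlap,
-- because both ranges contain the days 4 and 5."""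
--
--     if len(reservations) <= 1:
--         return False
--
--     sorted_reservations = sorted(reservations, key=lambda x:x[0])
--     first_resv = sorted_reservations[0]
--     for i in range(1,len(sorted_reservations)):
--         start_day = sorted_reservations[i][0]
--         if start_day <= first_resv[1]:
--             return True
--         first_resv = sorted_reservations[i]
--
--     return False
-- ===== SOURCE B (Python) =====
-- def check_overlapping(reservations):
--     # Two reservations overlap iff the later-starting one (ties: the later-listed)
--     # starts no later than the other one ends; test every pair directly, no sorting.
--     for i, (a, b) in enumerate(reservations):
--         for c, d in reservations[i + 1:]:
--             if (a <= c and c <= b) or (c < a and a <= d):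
--                 return True
--     return False
-- ===== Notes on version B (the rewrite author's own statement) =====
-- stated objective: alternative
-- what changed: Replaces A's sort-then-adjacent-scan with a direct all-pairs overlap test (the later-starting reservation must start no later than the other ends), returning on the first overlapping pair.
import Mathlib
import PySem

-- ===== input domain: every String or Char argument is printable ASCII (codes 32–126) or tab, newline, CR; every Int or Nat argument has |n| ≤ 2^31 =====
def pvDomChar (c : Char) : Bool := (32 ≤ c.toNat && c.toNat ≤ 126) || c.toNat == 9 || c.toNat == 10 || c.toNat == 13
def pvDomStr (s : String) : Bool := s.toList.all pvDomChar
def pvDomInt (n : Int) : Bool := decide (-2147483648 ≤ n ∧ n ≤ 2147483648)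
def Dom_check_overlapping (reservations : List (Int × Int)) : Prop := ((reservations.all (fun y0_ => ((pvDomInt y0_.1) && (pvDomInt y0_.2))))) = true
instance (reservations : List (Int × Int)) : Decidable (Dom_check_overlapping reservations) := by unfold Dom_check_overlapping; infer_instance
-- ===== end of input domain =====

-- B replaces A's sort + adjacent scan by a direct all-pairs test (the later-starting
-- reservation must start no later than the other one ends); same result on all inputs.


-- ===== PORT A =====
-- the 'for i in range(1, len)' loop: walks the sorted tail keeping first_resv as prev
def pvLoopA : (Int × Int) → List (Int × Int) → Bool
  | _, [] => false
  | prev, q :: rest => if q.1 ≤ prev.2 then true else pvLoopA q rest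

def check_overlapping (reservations : List (Int × Int)) : Bool :=
  if reservations.length ≤ 1 then false
  else
    match PySem.List.sorted reservations (fun x => x.1) with
    | [] => false  -- unreachable: the sorted list is nonempty here (totalization of [0])
    | p :: rest => pvLoopA p rest

-- ===== PORT B =====
-- the inner 'for (c, d) in reservations[i+1:]' test against (a, b)
def pvHit (p q : Int × Int) : Bool :=
  (p.1 ≤ q.1 && q.1 ≤ p.2) || (q.1 < p.1 && p.1 ≤ q.2)

def check_overlapping_alt : List (Int × Int) → Bool
  | [] => false
  | p :: rest => rest.any (pvHit p) || check_overlapping_alt rest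

-- ===== PRECONDITION & SPEC =====
def Spec_check_overlapping (reservations : List (Int × Int)) (out : Bool) : Prop := out = check_overlapping_alt reservations
instance (reservations : List (Int × Int)) (out : Bool) : Decidable (Spec_check_overlapping reservations out) := by unfold Spec_check_overlapping; infer_instance

-- ===== CLAIM (what is proved, stated in full; the proofs are below) =====
def Claim_equal_check_overlapping : Prop := ∀ (reservations : List (Int × Int)), Dom_check_overlapping reservations → Spec_check_overlapping reservations (check_overlapping reservations)

-- ===== LEMMAS AND PROOFS =====

-- relations used only by the proofs: pvGap = an earlier interval ends before a later
-- one starts; pvSep = the pair (in list order) does not overlap in B's sense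
def pvGap (p q : Int × Int) : Prop := p.2 < q.1
def pvSep (p q : Int × Int) : Prop := (p.1 ≤ q.1 → p.2 < q.1) ∧ (q.1 < p.1 → q.2 < p.1)

lemma pvHit_false_iff (p q : Int × Int) : pvHit p q = false ↔ pvSep p q := by
  simp [pvHit, pvSep]

lemma pvLoopA_true_iff (prev : Int × Int) (rest : List (Int × Int)) :
    pvLoopA prev rest = true ↔ ¬ List.IsChain pvGap (prev :: rest) := by
  induction rest generalizing prev with
  | nil => simp [pvLoopA]
  | cons q rest ih =>
      rw [List.isChain_cons_cons]
      simp only [pvLoopA]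
      by_cases h : q.1 ≤ prev.2
      · simp only [h, if_true, true_iff]
        intro hcontra
        have : pvGap prev q := hcontra.1
        unfold pvGap at this
        omega
      · simp only [h, if_false, ih q]
        have hg : pvGap prev q := by unfold pvGap; omega
        tauto

lemma pvAlt_true_iff (l : List (Int × Int)) :
    check_overlapping_alt l = true ↔ ¬ l.Pairwise pvSep := by
  induction l with
  | cons p rest ih =>
      simp only [check_overlapping_alt, Bool.or_eq_true, ih, List.pairwise_cons,
        List.any_eq_true]
      constructor
      · rintro (⟨q, hq, hhit⟩ | hnp) ⟨hall, hpw⟩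
        · exact absurd ((pvHit_false_iff p q).mpr (hall q hq)) (by simp [hhit])
        · exact hnp hpw
      · intro hnot
        by_cases hpw : rest.Pairwise pvSep
        · left
          by_contra hno
          push Not at hno
          exact hnot ⟨fun q hq => (pvHit_false_iff p q).mp (Bool.eq_false_iff.mpr (hno q hq)), hpw⟩
        · right; exact hpw
  | nil => simp [check_overlapping_alt]

-- on a key-sorted list an adjacent-gap chain spreads to all ordered pairs
lemma pvChain_to_pairwise_gap :
    ∀ (s : List (Int × Int)), s.Pairwise (fun a b => a.1 ≤ b.1) →
      s.IsChain pvGap → s.Pairwise pvGap := by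
  intro s
  induction s with
  | nil => intro _ _; simp
  | cons p rest ih =>
      intro hsort hc
      rw [List.pairwise_cons] at hsort ⊢
      rcases rest with _ | ⟨q, rest'⟩
      · exact ⟨by simp, by simp⟩
      · rw [List.isChain_cons_cons] at hc
        have htail := ih hsort.2 hc.2
        refine ⟨?_, htail⟩
        intro x hx
        rcases List.mem_cons.mp hx with rfl | hx'
        · exact hc.1
        · have hqx : q.1 ≤ x.1 := (List.pairwise_cons.mp hsort.2).1 x hx'
          have hpq : pvGap p q := hc.1
          unfold pvGap at hpq ⊢
          omega

lemma pvPairwise_to_chain :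
    ∀ (s : List (Int × Int)), s.Pairwise pvGap → s.IsChain pvGap := by
  intro s
  induction s with
  | nil => intro _; exact List.isChain_nil
  | cons p rest ih =>
      intro hp
      rw [List.pairwise_cons] at hp
      rcases rest with _ | ⟨q, rest'⟩
      · exact List.isChain_singleton p
      · rw [List.isChain_cons_cons]
        exact ⟨hp.1 q (List.mem_cons_self ..), ih hp.2⟩

-- stability, at the pairwise level: inserting x after all keys ≤ x.1 into a
-- key-sorted list is gap-pairwise iff the list was and x is separated from everything
lemma pvInsert_pairwise_iff (x : Int × Int) :
    ∀ (s : List (Int × Int)), s.Pairwise (fun a b => a.1 ≤ b.1) →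
      ((PySem.List.insertBy (fun a b => decide (a.1 < b.1)) x s).Pairwise pvGap ↔
        (s.Pairwise pvGap ∧ ∀ y ∈ s, pvSep y x)) := by
  intro s
  induction s with
  | nil =>
      intro _
      simp [PySem.List.insertBy]
  | cons y ys ih =>
      intro hsort
      rw [List.pairwise_cons] at hsort
      by_cases hxy : x.1 < y.1
      · -- x is inserted in front of y
        have hres : PySem.List.insertBy (fun a b => decide (a.1 < b.1)) x (y :: ys)
            = x :: y :: ys := by simp [PySem.List.insertBy, hxy]
        rw [hres, List.pairwise_cons, List.pairwise_cons]
        constructor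
        · rintro ⟨hgx, hpw⟩
          refine ⟨hpw, ?_⟩
          intro w hw
          have hgxw : pvGap x w := hgx w hw
          have hyw : y.1 ≤ w.1 := by
            rcases List.mem_cons.mp hw with rfl | hw'
            · omega
            · exact hsort.1 w hw'
          unfold pvGap at hgxw
          exact ⟨fun h => absurd h (by omega), fun _ => hgxw⟩
        · rintro ⟨hpw, hsep⟩
          refine ⟨?_, hpw⟩
          intro w hw
          have hyw : y.1 ≤ w.1 := by
            rcases List.mem_cons.mp hw with rfl | hw'
            · omega
            · exact hsort.1 w hw'
          have := (hsep w hw).2 (by omega)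
          unfold pvGap
          omega
      · -- y stays in front, x goes into ys
        have hres : PySem.List.insertBy (fun a b => decide (a.1 < b.1)) x (y :: ys)
            = y :: PySem.List.insertBy (fun a b => decide (a.1 < b.1)) x ys := by
          simp [PySem.List.insertBy, hxy]
        rw [hres, List.pairwise_cons, List.pairwise_cons, ih hsort.2]
        constructor
        · rintro ⟨hhead, hys, hsep⟩
          have hgyx : pvGap y x := hhead x ((PySem.List.mem_insertBy ..).mpr (Or.inl rfl))
          refine ⟨⟨fun w hw => hhead w ((PySem.List.mem_insertBy ..).mpr (Or.inr hw)), hys⟩, ?_⟩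
          intro w hw
          rcases List.mem_cons.mp hw with rfl | hw'
          · unfold pvGap at hgyx
            exact ⟨fun _ => hgyx, fun h => absurd h (by omega)⟩
          · exact hsep w hw'
        · rintro ⟨⟨hhead, hys⟩, hsep⟩
          refine ⟨?_, hys, fun w hw => hsep w (List.mem_cons_of_mem _ hw)⟩
          intro w hw
          rcases (PySem.List.mem_insertBy ..).mp hw with rfl | hw'
          · have := (hsep y (List.mem_cons_self ..)).1 (by omega)
            unfold pvGap
            omega
          · exact hhead w hw'

lemma pvSorted_snoc (l : List (Int × Int)) (x : Int × Int) :
    PySem.List.sorted (l ++ [x]) (fun p => p.1)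
      = PySem.List.insertBy (fun a b => decide (a.1 < b.1)) x
          (PySem.List.sorted l (fun p => p.1)) := by
  rw [PySem.List.sorted_eq_foldl_insertBy, PySem.List.sorted_eq_foldl_insertBy,
    List.foldl_append]
  rfl

-- the heart of the equivalence: all ordered pairs of the sorted list leave gaps
-- exactly when every ordered pair of the original list is separated in B's sense
lemma pvSortedPairwise_iff_pairwise (l : List (Int × Int)) :
    (PySem.List.sorted l (fun p => p.1)).Pairwise pvGap ↔ l.Pairwise pvSep := by
  induction l using List.reverseRecOn with
  | nil => simp [PySem.List.sorted]
  | append_singleton l x ih =>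
      rw [pvSorted_snoc,
        pvInsert_pairwise_iff x _ (PySem.List.sorted_pairwise l (fun p => p.1)),
        List.pairwise_append, ih]
      simp only [List.pairwise_cons, List.Pairwise.nil, List.mem_singleton]
      constructor
      · rintro ⟨hpl, hsep⟩
        exact ⟨hpl, by simp, fun a ha b hb => hb ▸ hsep a ((PySem.List.mem_sorted ..).mpr ha)⟩
      · rintro ⟨hpl, -, hsep⟩
        exact ⟨hpl, fun y hy => hsep y ((PySem.List.mem_sorted ..).mp hy) x rfl⟩

-- ===== VERDICT (by name: the statement is the Claim_ definition above) =====
theorem check_overlapping_spec : Claim_equal_check_overlapping := by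
  intro l _
  unfold Spec_check_overlapping
  unfold check_overlapping
  by_cases hlen : l.length ≤ 1
  · -- 0 or 1 reservations: both sides are false
    simp only [hlen, if_true]
    match l, hlen with
    | [], _ => rfl
    | [p], _ => simp [check_overlapping_alt]
  · simp only [hlen, if_false]
    have hsort := PySem.List.sorted_pairwise l (fun p => p.1)
    have hmain : (PySem.List.sorted l (fun p => p.1)).IsChain pvGap ↔ l.Pairwise pvSep := by
      rw [← pvSortedPairwise_iff_pairwise l]
      exact ⟨pvChain_to_pairwise_gap _ hsort, pvPairwise_to_chain _⟩
    rcases hseq : PySem.List.sorted l (fun p => p.1) with _ | ⟨p, rest⟩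
    · -- impossible: l has length ≥ 2
      have hperm : (PySem.List.sorted l (fun p => p.1)).Perm l := PySem.List.sorted_perm ..
      rw [hseq] at hperm
      have := hperm.length_eq
      simp at this
      omega
    · rw [hseq] at hmain
      rw [Bool.eq_iff_iff, pvLoopA_true_iff, pvAlt_true_iff, hmain]
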